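-- pv_equiv track=rewrite | github.com/bhaskarborah/CMU-Python | Week_3/week_3_while_loop.py | nth_awesome
-- ===== SOURCE A (Python) =====
-- def is_awesome(n):
--     return (n % 3 == 0) or (n % 5 == 0)
--
-- def nth_awesome(n):
--     num_found = 0
--     guess = 0
--     while (num_found < n):
--         guess += 1
--         if (is_awesome(guess)):
--             num_found += 1
--     return guess
-- ===== SOURCE B (Python) =====
-- def nth_awesome(n):
--     # closed form: multiples of 3 or 5 repeat with period 15 (7 per period)
--     if n <= 0:
--         return 0
--     q, r = divmod(n - 1, 7)
--     return 15 * q + (3, 5, 6, 9, 10, 12, 15)[r]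
-- ===== Notes on version B (the rewrite author's own statement) =====
-- stated objective: faster
-- what changed: Replaces the counting while-loop with O(1) period-15 arithmetic: divmod(n-1,7) picks the period and an offset table gives the answer.
import Mathlib
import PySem

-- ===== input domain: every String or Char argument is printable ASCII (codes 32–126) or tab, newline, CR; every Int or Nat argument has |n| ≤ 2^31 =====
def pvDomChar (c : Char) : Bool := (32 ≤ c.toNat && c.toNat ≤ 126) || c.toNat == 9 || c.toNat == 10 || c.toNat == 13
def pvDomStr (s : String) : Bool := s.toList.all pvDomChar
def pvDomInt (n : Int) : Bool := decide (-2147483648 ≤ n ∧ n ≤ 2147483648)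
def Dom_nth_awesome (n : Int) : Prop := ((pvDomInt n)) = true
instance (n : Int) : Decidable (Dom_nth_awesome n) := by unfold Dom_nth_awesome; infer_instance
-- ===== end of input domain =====

-- B replaces A's counting while-loop by period-15 arithmetic (divmod(n-1,7) + offset table).

-- ===== PORT A =====
def is_awesome (n : Int) : Bool := (PySem.Int.mod n 3 == 0) || (PySem.Int.mod n 5 == 0)

-- A's while-loop, state (num_found, guess); the Nat fuel is only a totality guard:
-- the loop needs at most 3*n + 3 iterations (proved below), so the fuel never runs out on Dom.
def nth_awesome_loop (fuel : Nat) (n num_found guess : Int) : Int :=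
  match fuel with
  | 0 => guess
  | fuel + 1 =>
    if num_found < n then
      let g := guess + 1
      if is_awesome g then nth_awesome_loop fuel n (num_found + 1) g
      else nth_awesome_loop fuel n num_found g
    else guess

def nth_awesome (n : Int) : Int := nth_awesome_loop (3 * n + 3).toNat n 0 0

-- ===== PORT B =====
-- tuple indexing (3,5,6,9,10,12,15)[r]; r is always in range (0 ≤ r < 7), so .getD 0 is unreachable
def nth_awesome_alt (n : Int) : Int :=
  if n ≤ 0 then 0
  else 15 * PySem.Int.floordiv (n - 1) 7 +
    (PySem.List.pyGet? ([3, 5, 6, 9, 10, 12, 15] : List Int) (PySem.Int.mod (n - 1) 7)).getD 0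

-- ===== PRECONDITION & SPEC =====
def Spec_nth_awesome (n : Int) (out : Int) : Prop := out = nth_awesome_alt n
instance (n : Int) (out : Int) : Decidable (Spec_nth_awesome n out) := by unfold Spec_nth_awesome; infer_instance

-- ===== CLAIM (what is proved, stated in full; the proofs are below) =====
def Claim_equal_nth_awesome : Prop := ∀ (n : Int), Dom_nth_awesome n → Spec_nth_awesome n (nth_awesome n)

-- ===== LEMMAS AND PROOFS =====

-- the offset of the r-th (0-based) awesome number within a period of 15
def pvTab (r : Int) : Int :=
  if r = 0 then 3 else if r = 1 then 5 else if r = 2 then 6 else if r = 3 then 9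
  else if r = 4 then 10 else if r = 5 then 12 else 15

lemma is_awesome_period (t c : Int) : is_awesome (15 * t + c) = is_awesome c := by
  have m3 : ∀ a : Int, PySem.Int.mod a 3 = a % 3 :=
    fun a => PySem.Int.mod_eq_emod_of_pos (by norm_num)
  have m5 : ∀ a : Int, PySem.Int.mod a 5 = a % 5 :=
    fun a => PySem.Int.mod_eq_emod_of_pos (by norm_num)
  rw [is_awesome, is_awesome, m3, m3, m5, m5,
      show (15 * t + c) % 3 = c % 3 by omega, show (15 * t + c) % 5 = c % 5 by omega]

-- one full period of A's loop, starting at a multiple of 15, with enough fuel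
lemma loop_chunk (n nf t : Int) (fuel : Nat) (h : nf < n) (hf : 3 * (n - nf) ≤ (fuel : Int)) :
    nth_awesome_loop fuel n nf (15 * t) =
      if n - nf ≤ 7 then 15 * t + pvTab (n - nf - 1)
      else nth_awesome_loop (fuel - 15) n (nf + 7) (15 * t + 15) := by
  have aw : ∀ c : Int, is_awesome (15 * t + c) = is_awesome c := is_awesome_period t
  have nr : ∀ (f1 f0 : Nat) (nf' c c' : Int), f1 = f0 + 1 → nf' < n → c' = c + 1 →
      is_awesome c' = false →
      nth_awesome_loop f1 n nf' (15 * t + c) = nth_awesome_loop f0 n nf' (15 * t + c') := by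
    intro f1 f0 nf' c c' hfe h' he hc; subst hfe; subst he
    simp only [nth_awesome_loop, if_pos h',
      show 15 * t + c + 1 = 15 * t + (c + 1) by ring, aw, hc]
    simp
  have yr : ∀ (f1 f0 : Nat) (nf' nf'' c c' : Int), f1 = f0 + 1 → nf' < n → nf'' = nf' + 1 →
      c' = c + 1 → is_awesome c' = true →
      nth_awesome_loop f1 n nf' (15 * t + c) = nth_awesome_loop f0 n nf'' (15 * t + c') := by
    intro f1 f0 nf' nf'' c c' hfe h' hn' he hc; subst hfe; subst hn'; subst he
    simp only [nth_awesome_loop, if_pos h',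
      show 15 * t + c + 1 = 15 * t + (c + 1) by ring, aw, hc]
    simp
  have stop : ∀ (f : Nat) (nf' g : Int), ¬ nf' < n → nth_awesome_loop f n nf' g = g := by
    intro f nf' g h'
    cases f with
    | zero => rfl
    | succ k => simp only [nth_awesome_loop, if_neg h']
  have start : ∀ (f : Nat), nth_awesome_loop f n nf (15 * t) = nth_awesome_loop f n nf (15 * t + 0) :=
    fun f => congrArg (nth_awesome_loop f n nf) (by ring)
  by_cases k1 : n - nf ≤ 1
  · obtain ⟨m, rfl⟩ : ∃ m, fuel = m + 3 := ⟨fuel - 3, by omega⟩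
    rw [start,
        nr (m+3) (m+2) nf 0 1 (by omega) h (by norm_num) (by decide),
        nr (m+2) (m+1) nf 1 2 (by omega) h (by norm_num) (by decide),
        yr (m+1) (m) nf (nf+1) 2 3 (by omega) h (by ring) (by norm_num) (by decide),
        stop m _ _ (by omega),
        if_pos (by omega),
        show n - nf - 1 = 0 by omega]
    norm_num [pvTab]
  · by_cases k2 : n - nf ≤ 2
    · obtain ⟨m, rfl⟩ : ∃ m, fuel = m + 5 := ⟨fuel - 5, by omega⟩
      rw [start,
          nr (m+5) (m+4) nf 0 1 (by omega) h (by norm_num) (by decide),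
          nr (m+4) (m+3) nf 1 2 (by omega) h (by norm_num) (by decide),
          yr (m+3) (m+2) nf (nf+1) 2 3 (by omega) h (by ring) (by norm_num) (by decide),
          nr (m+2) (m+1) (nf+1) 3 4 (by omega) (by omega) (by norm_num) (by decide),
          yr (m+1) (m) (nf+1) (nf+2) 4 5 (by omega) (by omega) (by ring) (by norm_num) (by decide),
          stop m _ _ (by omega),
          if_pos (by omega),
          show n - nf - 1 = 1 by omega]
      norm_num [pvTab]
    · by_cases k3 : n - nf ≤ 3
      · obtain ⟨m, rfl⟩ : ∃ m, fuel = m + 6 := ⟨fuel - 6, by omega⟩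
        rw [start,
            nr (m+6) (m+5) nf 0 1 (by omega) h (by norm_num) (by decide),
            nr (m+5) (m+4) nf 1 2 (by omega) h (by norm_num) (by decide),
            yr (m+4) (m+3) nf (nf+1) 2 3 (by omega) h (by ring) (by norm_num) (by decide),
            nr (m+3) (m+2) (nf+1) 3 4 (by omega) (by omega) (by norm_num) (by decide),
            yr (m+2) (m+1) (nf+1) (nf+2) 4 5 (by omega) (by omega) (by ring) (by norm_num) (by decide),
            yr (m+1) (m) (nf+2) (nf+3) 5 6 (by omega) (by omega) (by ring) (by norm_num) (by decide),
            stop m _ _ (by omega),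
            if_pos (by omega),
            show n - nf - 1 = 2 by omega]
        norm_num [pvTab]
      · by_cases k4 : n - nf ≤ 4
        · obtain ⟨m, rfl⟩ : ∃ m, fuel = m + 9 := ⟨fuel - 9, by omega⟩
          rw [start,
              nr (m+9) (m+8) nf 0 1 (by omega) h (by norm_num) (by decide),
              nr (m+8) (m+7) nf 1 2 (by omega) h (by norm_num) (by decide),
              yr (m+7) (m+6) nf (nf+1) 2 3 (by omega) h (by ring) (by norm_num) (by decide),
              nr (m+6) (m+5) (nf+1) 3 4 (by omega) (by omega) (by norm_num) (by decide),
              yr (m+5) (m+4) (nf+1) (nf+2) 4 5 (by omega) (by omega) (by ring) (by norm_num) (by decide),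
              yr (m+4) (m+3) (nf+2) (nf+3) 5 6 (by omega) (by omega) (by ring) (by norm_num) (by decide),
              nr (m+3) (m+2) (nf+3) 6 7 (by omega) (by omega) (by norm_num) (by decide),
              nr (m+2) (m+1) (nf+3) 7 8 (by omega) (by omega) (by norm_num) (by decide),
              yr (m+1) (m) (nf+3) (nf+4) 8 9 (by omega) (by omega) (by ring) (by norm_num) (by decide),
              stop m _ _ (by omega),
              if_pos (by omega),
              show n - nf - 1 = 3 by omega]
          norm_num [pvTab]
        · by_cases k5 : n - nf ≤ 5
          · obtain ⟨m, rfl⟩ : ∃ m, fuel = m + 10 := ⟨fuel - 10, by omega⟩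
            rw [start,
                nr (m+10) (m+9) nf 0 1 (by omega) h (by norm_num) (by decide),
                nr (m+9) (m+8) nf 1 2 (by omega) h (by norm_num) (by decide),
                yr (m+8) (m+7) nf (nf+1) 2 3 (by omega) h (by ring) (by norm_num) (by decide),
                nr (m+7) (m+6) (nf+1) 3 4 (by omega) (by omega) (by norm_num) (by decide),
                yr (m+6) (m+5) (nf+1) (nf+2) 4 5 (by omega) (by omega) (by ring) (by norm_num) (by decide),
                yr (m+5) (m+4) (nf+2) (nf+3) 5 6 (by omega) (by omega) (by ring) (by norm_num) (by decide),
                nr (m+4) (m+3) (nf+3) 6 7 (by omega) (by omega) (by norm_num) (by decide),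
                nr (m+3) (m+2) (nf+3) 7 8 (by omega) (by omega) (by norm_num) (by decide),
                yr (m+2) (m+1) (nf+3) (nf+4) 8 9 (by omega) (by omega) (by ring) (by norm_num) (by decide),
                yr (m+1) (m) (nf+4) (nf+5) 9 10 (by omega) (by omega) (by ring) (by norm_num) (by decide),
                stop m _ _ (by omega),
                if_pos (by omega),
                show n - nf - 1 = 4 by omega]
            norm_num [pvTab]
          · by_cases k6 : n - nf ≤ 6
            · obtain ⟨m, rfl⟩ : ∃ m, fuel = m + 12 := ⟨fuel - 12, by omega⟩
              rw [start,
                  nr (m+12) (m+11) nf 0 1 (by omega) h (by norm_num) (by decide),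
                  nr (m+11) (m+10) nf 1 2 (by omega) h (by norm_num) (by decide),
                  yr (m+10) (m+9) nf (nf+1) 2 3 (by omega) h (by ring) (by norm_num) (by decide),
                  nr (m+9) (m+8) (nf+1) 3 4 (by omega) (by omega) (by norm_num) (by decide),
                  yr (m+8) (m+7) (nf+1) (nf+2) 4 5 (by omega) (by omega) (by ring) (by norm_num) (by decide),
                  yr (m+7) (m+6) (nf+2) (nf+3) 5 6 (by omega) (by omega) (by ring) (by norm_num) (by decide),
                  nr (m+6) (m+5) (nf+3) 6 7 (by omega) (by omega) (by norm_num) (by decide),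
                  nr (m+5) (m+4) (nf+3) 7 8 (by omega) (by omega) (by norm_num) (by decide),
                  yr (m+4) (m+3) (nf+3) (nf+4) 8 9 (by omega) (by omega) (by ring) (by norm_num) (by decide),
                  yr (m+3) (m+2) (nf+4) (nf+5) 9 10 (by omega) (by omega) (by ring) (by norm_num) (by decide),
                  nr (m+2) (m+1) (nf+5) 10 11 (by omega) (by omega) (by norm_num) (by decide),
                  yr (m+1) (m) (nf+5) (nf+6) 11 12 (by omega) (by omega) (by ring) (by norm_num) (by decide),
                  stop m _ _ (by omega),
                  if_pos (by omega),
                  show n - nf - 1 = 5 by omega]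
              norm_num [pvTab]
            · by_cases k7 : n - nf ≤ 7
              · obtain ⟨m, rfl⟩ : ∃ m, fuel = m + 15 := ⟨fuel - 15, by omega⟩
                rw [start,
                    nr (m+15) (m+14) nf 0 1 (by omega) h (by norm_num) (by decide),
                    nr (m+14) (m+13) nf 1 2 (by omega) h (by norm_num) (by decide),
                    yr (m+13) (m+12) nf (nf+1) 2 3 (by omega) h (by ring) (by norm_num) (by decide),
                    nr (m+12) (m+11) (nf+1) 3 4 (by omega) (by omega) (by norm_num) (by decide),
                    yr (m+11) (m+10) (nf+1) (nf+2) 4 5 (by omega) (by omega) (by ring) (by norm_num) (by decide),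
                    yr (m+10) (m+9) (nf+2) (nf+3) 5 6 (by omega) (by omega) (by ring) (by norm_num) (by decide),
                    nr (m+9) (m+8) (nf+3) 6 7 (by omega) (by omega) (by norm_num) (by decide),
                    nr (m+8) (m+7) (nf+3) 7 8 (by omega) (by omega) (by norm_num) (by decide),
                    yr (m+7) (m+6) (nf+3) (nf+4) 8 9 (by omega) (by omega) (by ring) (by norm_num) (by decide),
                    yr (m+6) (m+5) (nf+4) (nf+5) 9 10 (by omega) (by omega) (by ring) (by norm_num) (by decide),
                    nr (m+5) (m+4) (nf+5) 10 11 (by omega) (by omega) (by norm_num) (by decide),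
                    yr (m+4) (m+3) (nf+5) (nf+6) 11 12 (by omega) (by omega) (by ring) (by norm_num) (by decide),
                    nr (m+3) (m+2) (nf+6) 12 13 (by omega) (by omega) (by norm_num) (by decide),
                    nr (m+2) (m+1) (nf+6) 13 14 (by omega) (by omega) (by norm_num) (by decide),
                    yr (m+1) (m) (nf+6) (nf+7) 14 15 (by omega) (by omega) (by ring) (by norm_num) (by decide),
                    stop m _ _ (by omega),
                    if_pos (by omega),
                    show n - nf - 1 = 6 by omega]
                norm_num [pvTab]
              · obtain ⟨m, rfl⟩ : ∃ m, fuel = m + 15 := ⟨fuel - 15, by omega⟩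
                rw [start,
                    nr (m+15) (m+14) nf 0 1 (by omega) h (by norm_num) (by decide),
                    nr (m+14) (m+13) nf 1 2 (by omega) h (by norm_num) (by decide),
                    yr (m+13) (m+12) nf (nf+1) 2 3 (by omega) h (by ring) (by norm_num) (by decide),
                    nr (m+12) (m+11) (nf+1) 3 4 (by omega) (by omega) (by norm_num) (by decide),
                    yr (m+11) (m+10) (nf+1) (nf+2) 4 5 (by omega) (by omega) (by ring) (by norm_num) (by decide),
                    yr (m+10) (m+9) (nf+2) (nf+3) 5 6 (by omega) (by omega) (by ring) (by norm_num) (by decide),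
                    nr (m+9) (m+8) (nf+3) 6 7 (by omega) (by omega) (by norm_num) (by decide),
                    nr (m+8) (m+7) (nf+3) 7 8 (by omega) (by omega) (by norm_num) (by decide),
                    yr (m+7) (m+6) (nf+3) (nf+4) 8 9 (by omega) (by omega) (by ring) (by norm_num) (by decide),
                    yr (m+6) (m+5) (nf+4) (nf+5) 9 10 (by omega) (by omega) (by ring) (by norm_num) (by decide),
                    nr (m+5) (m+4) (nf+5) 10 11 (by omega) (by omega) (by norm_num) (by decide),
                    yr (m+4) (m+3) (nf+5) (nf+6) 11 12 (by omega) (by omega) (by ring) (by norm_num) (by decide),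
                    nr (m+3) (m+2) (nf+6) 12 13 (by omega) (by omega) (by norm_num) (by decide),
                    nr (m+2) (m+1) (nf+6) 13 14 (by omega) (by omega) (by norm_num) (by decide),
                    yr (m+1) (m) (nf+6) (nf+7) 14 15 (by omega) (by omega) (by ring) (by norm_num) (by decide),
                    if_neg k7,
                    show m + 15 - 15 = m by omega]

-- closed form for the loop by strong induction on the remaining count
lemma loop_closed (m : Nat) : ∀ (n nf t : Int) (fuel : Nat), nf < n → (n - nf).toNat = m →
    3 * (n - nf) ≤ (fuel : Int) →
    nth_awesome_loop fuel n nf (15 * t) =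
      15 * t + 15 * ((n - nf - 1) / 7) + pvTab ((n - nf - 1) % 7) := by
  induction m using Nat.strong_induction_on with
  | _ m ih =>
    intro n nf t fuel h hm hf
    rw [loop_chunk n nf t fuel h hf]
    by_cases k7 : n - nf ≤ 7
    · rw [if_pos k7, show (n - nf - 1) / 7 = 0 by omega, show (n - nf - 1) % 7 = n - nf - 1 by omega]
      ring
    · rw [if_neg k7, show (15 : Int) * t + 15 = 15 * (t + 1) by ring,
          ih (n - (nf + 7)).toNat (by omega) n (nf + 7) (t + 1) (fuel - 15) (by omega) rfl (by omega),
          show (n - (nf + 7) - 1) % 7 = (n - nf - 1) % 7 by omega,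
          show (n - (nf + 7) - 1) / 7 = (n - nf - 1) / 7 - 1 by omega]
      ring

lemma tab_pyGet (r : Int) (h0 : 0 ≤ r) (h7 : r < 7) :
    (PySem.List.pyGet? ([3, 5, 6, 9, 10, 12, 15] : List Int) r).getD 0 = pvTab r := by
  interval_cases r <;> decide

-- ===== VERDICT (by name: the statement is the Claim_ definition above) =====
theorem nth_awesome_spec : Claim_equal_nth_awesome := by
  intro n _
  show nth_awesome n = nth_awesome_alt n
  unfold nth_awesome nth_awesome_alt
  by_cases hn : n ≤ 0
  · rw [if_pos hn]
    rcases Nat.eq_zero_or_pos (3 * n + 3).toNat with h0 | hpos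
    · rw [h0]; rfl
    · obtain ⟨k, hk⟩ := Nat.exists_eq_succ_of_ne_zero (Nat.pos_iff_ne_zero.mp hpos)
      rw [hk]
      simp only [nth_awesome_loop, if_neg (by omega : ¬ (0 : Int) < n)]
  · have h : (0 : Int) < n := by omega
    have hc := loop_closed (n - 0).toNat n 0 0 ((3 * n + 3).toNat) h rfl (by omega)
    simp only [mul_zero, zero_add, sub_zero] at hc
    rw [hc, if_neg hn,
        PySem.Int.floordiv_eq_ediv_of_pos (by norm_num),
        PySem.Int.mod_eq_emod_of_pos (by norm_num),
        tab_pyGet ((n - 1) % 7) (by omega) (by omega)]
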